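-- pv_equiv track=rewrite | github.com/markalex/advent_of_code_2016 | day_two/day_two_part_two.py | process
-- ===== SOURCE A (Python) =====
-- keypad = {
--     (0, 2): '1',
--     (1, 1): '2',
--     (1, 2): '3',
--     (1, 3): '4',
--     (2, 0): '5',
--     (2, 1): '6',
--     (2, 2): '7',
--     (2, 3): '8',
--     (2, 4): '9',
--     (3, 1): 'A',
--     (3, 2): 'B',
--     (3, 3): 'C',
--     (4, 2): 'D',
-- }
--
-- def process(input):
--     pos = (2, 0)
--     codez = []
--
--     for line in input.splitlines():
--         for cmd in line.strip():
--             val = move(pos, cmd)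
--             if val in keypad:
--                 pos = val
--
--         codez.append(keypad[pos])
--
--     return ''.join(codez)
--
-- def move(location, dir):
--     x, y = location
--
--     if dir == "U":
--         return (x-1, y)
--     elif dir == "D":
--         return (x+1, y)
--     elif dir == "L":
--         return (x, y-1)
--     elif dir == "R":
--         return (x, y+1)
-- ===== SOURCE B (Python) =====
-- # B: maintain the current key CHARACTER and step via a precomputed
-- # (key, direction) -> neighbour transition table; no coordinates at all.
-- _TRANS = {
--     ('1', 'D'): '3',
--     ('2', 'R'): '3', ('2', 'D'): '6',
--     ('3', 'U'): '1', ('3', 'L'): '2', ('3', 'R'): '4', ('3', 'D'): '7',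
--     ('4', 'L'): '3', ('4', 'D'): '8',
--     ('5', 'R'): '6',
--     ('6', 'U'): '2', ('6', 'L'): '5', ('6', 'R'): '7', ('6', 'D'): 'A',
--     ('7', 'U'): '3', ('7', 'L'): '6', ('7', 'R'): '8', ('7', 'D'): 'B',
--     ('8', 'U'): '4', ('8', 'L'): '7', ('8', 'R'): '9', ('8', 'D'): 'C',
--     ('9', 'L'): '8',
--     ('A', 'U'): '6', ('A', 'R'): 'B',
--     ('B', 'U'): '7', ('B', 'L'): 'A', ('B', 'R'): 'C', ('B', 'D'): 'D',
--     ('C', 'U'): '8', ('C', 'L'): 'B',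
--     ('D', 'U'): 'B',
-- }
--
-- def process(input):
--     cur = '5'
--     out = []
--     for line in input.splitlines():
--         for cmd in line.strip():
--             cur = _TRANS.get((cur, cmd), cur)
--         out.append(cur)
--     return ''.join(out)
-- ===== Notes on version B (the rewrite author's own statement) =====
-- stated objective: alternative
-- what changed: B drops the (row,col) coordinate simulation and move() arithmetic entirely: it precomputes a (key char, direction) -> neighbour-key transition table and walks key characters directly, with cur = trans.get((cur, cmd), cur).
import Mathlib
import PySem

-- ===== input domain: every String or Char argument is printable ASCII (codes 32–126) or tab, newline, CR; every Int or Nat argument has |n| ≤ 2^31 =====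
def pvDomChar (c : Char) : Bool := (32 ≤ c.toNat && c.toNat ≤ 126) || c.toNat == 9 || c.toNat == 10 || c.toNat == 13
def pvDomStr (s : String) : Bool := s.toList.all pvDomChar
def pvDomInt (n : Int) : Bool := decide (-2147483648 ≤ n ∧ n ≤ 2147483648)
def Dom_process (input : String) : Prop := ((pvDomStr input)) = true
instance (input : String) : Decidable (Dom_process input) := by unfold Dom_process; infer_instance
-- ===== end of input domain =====

-- B replaces A's (row, col) coordinate walk by a precomputed (key, direction) → key
-- transition table over the key characters themselves (objective: alternative).

-- ===== PORT A =====
def keypadA : PySem.Dict (Int × Int) Char := PySem.Dict.mk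
  [((0, 2), '1'), ((1, 1), '2'), ((1, 2), '3'), ((1, 3), '4'),
   ((2, 0), '5'), ((2, 1), '6'), ((2, 2), '7'), ((2, 3), '8'), ((2, 4), '9'),
   ((3, 1), 'A'), ((3, 2), 'B'), ((3, 3), 'C'), ((4, 2), 'D')]

-- Python's move falls through and returns None for a non-UDLR char: Option here.
def moveA (location : Int × Int) (dir : Char) : Option (Int × Int) :=
  if dir = 'U' then some (location.1 - 1, location.2)
  else if dir = 'D' then some (location.1 + 1, location.2)
  else if dir = 'L' then some (location.1, location.2 - 1)
  else if dir = 'R' then some (location.1, location.2 + 1)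
  else none

-- body of A's inner loop: 'val = move(pos, cmd); if val in keypad: pos = val'
-- ('None in keypad' is False, so None leaves pos unchanged)
def stepA (pos : Int × Int) (cmd : Char) : Int × Int :=
  match moveA pos cmd with
  | some val => if keypadA.contains val then val else pos
  | none => pos

-- body of A's outer loop; keypad[pos]: pos is always a key (it starts at (2,0)
-- and is only ever replaced by keys), so getD's '?' default is never reached.
def lineA (st : (Int × Int) × List Char) (line : String) : (Int × Int) × List Char :=
  let pos := (PySem.Str.strip line).toList.foldl stepA st.1
  (pos, st.2 ++ [(keypadA.get? pos).getD '?'])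

def process (input : String) : String :=
  String.ofList ((PySem.Str.splitlines input).foldl lineA ((2, 0), [])).2

-- ===== PORT B =====
def transB : PySem.Dict (Char × Char) Char := PySem.Dict.mk
  [(('1', 'D'), '3'),
   (('2', 'R'), '3'), (('2', 'D'), '6'),
   (('3', 'U'), '1'), (('3', 'L'), '2'), (('3', 'R'), '4'), (('3', 'D'), '7'),
   (('4', 'L'), '3'), (('4', 'D'), '8'),
   (('5', 'R'), '6'),
   (('6', 'U'), '2'), (('6', 'L'), '5'), (('6', 'R'), '7'), (('6', 'D'), 'A'),
   (('7', 'U'), '3'), (('7', 'L'), '6'), (('7', 'R'), '8'), (('7', 'D'), 'B'),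
   (('8', 'U'), '4'), (('8', 'L'), '7'), (('8', 'R'), '9'), (('8', 'D'), 'C'),
   (('9', 'L'), '8'),
   (('A', 'U'), '6'), (('A', 'R'), 'B'),
   (('B', 'U'), '7'), (('B', 'L'), 'A'), (('B', 'R'), 'C'), (('B', 'D'), 'D'),
   (('C', 'U'), '8'), (('C', 'L'), 'B'),
   (('D', 'U'), 'B')]

-- cur = _TRANS.get((cur, cmd), cur)
def stepB (cur : Char) (cmd : Char) : Char := (transB.get? (cur, cmd)).getD cur

def lineB (st : Char × List Char) (line : String) : Char × List Char :=
  let cur := (PySem.Str.strip line).toList.foldl stepB st.1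
  (cur, st.2 ++ [cur])

def process_alt (input : String) : String :=
  String.ofList ((PySem.Str.splitlines input).foldl lineB ('5', [])).2

-- ===== PRECONDITION & SPEC =====
def Spec_process (input : String) (out : String) : Prop := out = process_alt input
instance (input : String) (out : String) : Decidable (Spec_process input out) := by unfold Spec_process; infer_instance

-- ===== CLAIM (what is proved, stated in full; the proofs are below) =====
def Claim_equal_process : Prop := ∀ (input : String), Dom_process input → Spec_process input (process input)

-- ===== LEMMAS AND PROOFS =====

-- the simulation relation: pos is a keypad coordinate and cur is its key label
def GoodPairs : List ((Int × Int) × Char) :=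
  [((0, 2), '1'), ((1, 1), '2'), ((1, 2), '3'), ((1, 3), '4'),
   ((2, 0), '5'), ((2, 1), '6'), ((2, 2), '7'), ((2, 3), '8'), ((2, 4), '9'),
   ((3, 1), 'A'), ((3, 2), 'B'), ((3, 3), 'C'), ((4, 2), 'D')]

def Good (pos : Int × Int) (cur : Char) : Prop := (pos, cur) ∈ GoodPairs

theorem stepA_other (pos : Int × Int) (c : Char)
    (hU : c ≠ 'U') (hD : c ≠ 'D') (hL : c ≠ 'L') (hR : c ≠ 'R') :
    stepA pos c = pos := by
  simp [stepA, moveA, hU, hD, hL, hR]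

theorem stepB_other (cur c : Char)
    (hU : c ≠ 'U') (hD : c ≠ 'D') (hL : c ≠ 'L') (hR : c ≠ 'R') :
    stepB cur c = cur := by
  simp [stepB, transB, PySem.Dict.get?_mk_cons, PySem.Dict.get?, beq_iff_eq, Prod.mk.injEq,
    Ne.symm hU, Ne.symm hD, Ne.symm hL, Ne.symm hR]

theorem step_good (pos : Int × Int) (cur : Char) (h : Good pos cur) (c : Char) :
    Good (stepA pos c) (stepB cur c) := by
  simp only [Good, GoodPairs, List.mem_cons, List.not_mem_nil, or_false,
    Prod.mk.injEq] at h
  rcases h with ⟨rfl, rfl⟩|⟨rfl, rfl⟩|⟨rfl, rfl⟩|⟨rfl, rfl⟩|⟨rfl, rfl⟩|⟨rfl, rfl⟩|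
    ⟨rfl, rfl⟩|⟨rfl, rfl⟩|⟨rfl, rfl⟩|⟨rfl, rfl⟩|⟨rfl, rfl⟩|⟨rfl, rfl⟩|⟨rfl, rfl⟩ <;>
  · by_cases hU : c = 'U'
    · subst hU; unfold Good; decide
    · by_cases hD : c = 'D'
      · subst hD; unfold Good; decide
      · by_cases hL : c = 'L'
        · subst hL; unfold Good; decide
        · by_cases hR : c = 'R'
          · subst hR; unfold Good; decide
          · rw [stepA_other _ _ hU hD hL hR, stepB_other _ _ hU hD hL hR]
            unfold Good; decide

theorem readoff (pos : Int × Int) (cur : Char) (h : Good pos cur) :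
    (keypadA.get? pos).getD '?' = cur := by
  simp only [Good, GoodPairs, List.mem_cons, List.not_mem_nil, or_false,
    Prod.mk.injEq] at h
  rcases h with ⟨rfl, rfl⟩|⟨rfl, rfl⟩|⟨rfl, rfl⟩|⟨rfl, rfl⟩|⟨rfl, rfl⟩|⟨rfl, rfl⟩|
    ⟨rfl, rfl⟩|⟨rfl, rfl⟩|⟨rfl, rfl⟩|⟨rfl, rfl⟩|⟨rfl, rfl⟩|⟨rfl, rfl⟩|⟨rfl, rfl⟩ <;>
    decide

theorem foldl_good (cs : List Char) (pos : Int × Int) (cur : Char) (h : Good pos cur) :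
    Good (cs.foldl stepA pos) (cs.foldl stepB cur) := by
  induction cs generalizing pos cur with
  | nil => exact h
  | cons c cs ih => exact ih _ _ (step_good _ _ h c)

theorem lines_good (lines : List String) (pos : Int × Int) (cur : Char)
    (acc : List Char) (h : Good pos cur) :
    (lines.foldl lineA (pos, acc)).2 = (lines.foldl lineB (cur, acc)).2 := by
  induction lines generalizing pos cur acc with
  | nil => rfl
  | cons l ls ih =>
      have hg := foldl_good (PySem.Str.strip l).toList pos cur h
      simp only [List.foldl_cons, lineA, lineB, readoff _ _ hg]
      exact ih _ _ _ hg

-- ===== VERDICT (by name: the statement is the Claim_ definition above) =====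
theorem process_spec : Claim_equal_process := by
  intro input _
  unfold Spec_process process process_alt
  exact congrArg String.ofList
    (lines_good (PySem.Str.splitlines input) (2, 0) '5' [] (by unfold Good; decide))
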